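-- pv_equiv track=rewrite | github.com/kamilamo0809/Specialisation_Project | Plots.py | make_monthly_list
-- ===== SOURCE A (Python) =====
-- def make_monthly_list(yearly_list):
--     days_in_month = [31, 28, 31, 30, 31, 30, 31, 31, 30, 31, 30, 31]
--     all_hours_in_year = []
--     start_idx = 0
--     for month in days_in_month:
--         days = []
--         all_hours_in_year.append(yearly_list[start_idx * 24: (start_idx + month) * 24])
--         start_idx += month
--     return all_hours_in_year
-- ===== SOURCE B (Python) =====
-- def make_monthly_list(yearly_list):
--     days_in_month = [31, 28, 31, 30, 31, 30, 31, 31, 30, 31, 30, 31]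
--     hours_left = days_in_month[0] * 24
--     rest = days_in_month[1:]
--     finished = []
--     current = []
--     for x in yearly_list:
--         while hours_left == 0:
--             finished.append(current)
--             current = []
--             if not rest:
--                 return finished
--             hours_left = rest.pop(0) * 24
--         current.append(x)
--         hours_left -= 1
--     finished.append(current)
--     for _ in rest:
--         finished.append([])
--     return finished
-- ===== Notes on version B (the rewrite author's own statement) =====
-- stated objective: alternative
-- what changed: B never slices: it makes a single element-wise pass over the input, streaming each hour into a current-month bucket with a countdown of hours left in the month, closing the bucket and popping the next month's budget when the countdown hits zero (and padding empty months if the input is short), instead of A's per-month slicing with a running start index.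
import Mathlib
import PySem

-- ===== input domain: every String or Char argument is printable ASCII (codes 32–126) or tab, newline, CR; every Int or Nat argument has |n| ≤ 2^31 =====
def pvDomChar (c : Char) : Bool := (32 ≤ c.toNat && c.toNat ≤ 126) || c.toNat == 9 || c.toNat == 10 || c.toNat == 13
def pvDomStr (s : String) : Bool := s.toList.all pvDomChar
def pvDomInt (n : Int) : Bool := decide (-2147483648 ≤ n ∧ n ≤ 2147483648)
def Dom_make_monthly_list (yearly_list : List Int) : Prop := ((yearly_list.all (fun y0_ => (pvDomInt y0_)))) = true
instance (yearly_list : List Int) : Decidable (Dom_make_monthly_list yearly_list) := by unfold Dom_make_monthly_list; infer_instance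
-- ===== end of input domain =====

set_option maxRecDepth 4000


-- B replaces A's per-month slicing by a single element-wise pass that streams each hour
-- into a current-month bucket with a countdown; same values, same cost (alternative decomposition).

-- ===== PORT A =====
-- A: loop over days_in_month with a running start_idx, appending
-- yearly_list[start_idx*24 : (start_idx+month)*24]
def make_monthly_list (yearly_list : List Int) : List (List Int) :=
  let days_in_month : List Int := [31, 28, 31, 30, 31, 30, 31, 31, 30, 31, 30, 31]
  let r := days_in_month.foldl
    (fun (st : List (List Int) × Int) month =>
      (st.1 ++ [PySem.List.slice yearly_list (some (st.2 * 24)) (some ((st.2 + month) * 24))],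
       st.2 + month))
    ([], 0)
  r.1

-- ===== PORT B =====
-- B's inner `while hours_left == 0:` loop: every iteration pops a month from `rest`
-- (or returns), so it is structural recursion on `rest`.
-- Sum.inl = the early `return finished` inside the loop; Sum.inr = the continue state.
def pvWhileB (finished : List (List Int)) (current : List Int) (hours_left : Int)
    (rest : List Int) : (List (List Int)) ⊕ (List (List Int) × List Int × Int × List Int) :=
  if hours_left == 0 then
    let finished' := finished ++ [current]
    match rest with
    | [] => Sum.inl finished'
    | d :: rest' => pvWhileB finished' [] (d * 24) rest'
  else Sum.inr (finished, current, hours_left, rest)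

-- B's loop body (per element of yearly_list)
def pvStepB (st : (List (List Int)) ⊕ (List (List Int) × List Int × Int × List Int))
    (x : Int) : (List (List Int)) ⊕ (List (List Int) × List Int × Int × List Int) :=
  match st with
  | Sum.inl fin => Sum.inl fin            -- already returned: remaining iterations are skipped
  | Sum.inr (fin, cur, hl, rest) =>
    match pvWhileB fin cur hl rest with
    | Sum.inl fin' => Sum.inl fin'
    | Sum.inr (fin', cur', hl', rest') => Sum.inr (fin', cur' ++ [x], hl' - 1, rest')

-- B: one pass over yearly_list; each element goes into the current bucket, the countdown
-- closes a month when it hits 0; short inputs are padded with empty months at the end.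
def make_monthly_list_alt (yearly_list : List Int) : List (List Int) :=
  let days_in_month : List Int := [31, 28, 31, 30, 31, 30, 31, 31, 30, 31, 30, 31]
  let hours_left0 := (days_in_month.getD 0 0) * 24
  let rest0 := days_in_month.drop 1
  match yearly_list.foldl pvStepB (Sum.inr ([], [], hours_left0, rest0)) with
  | Sum.inl fin => fin
  | Sum.inr (fin, cur, _, rest) => (fin ++ [cur]) ++ rest.map (fun _ => ([] : List Int))

-- ===== PRECONDITION & SPEC =====
def Spec_make_monthly_list (yearly_list : List Int) (out : List (List Int)) : Prop := out = make_monthly_list_alt yearly_list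
instance (yearly_list : List Int) (out : List (List Int)) : Decidable (Spec_make_monthly_list yearly_list out) := by unfold Spec_make_monthly_list; infer_instance

-- ===== CLAIM (what is proved, stated in full; the proofs are below) =====
def Claim_equal_make_monthly_list : Prop := ∀ (yearly_list : List Int), Dom_make_monthly_list yearly_list → Spec_make_monthly_list yearly_list (make_monthly_list yearly_list)

-- ===== LEMMAS AND PROOFS =====

-- common normal form: chop ys into chunks of d*24 elements, one per remaining month
def pvChunks (ys : List Int) (ds : List Int) : List (List Int) :=
  match ds with
  | [] => []
  | d :: ds' => ys.take (d * 24).toNat :: pvChunks (ys.drop (d * 24).toNat) ds'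

-- finalization applied to B's fold result
def pvFinal (st : (List (List Int)) ⊕ (List (List Int) × List Int × Int × List Int)) :
    List (List Int) :=
  match st with
  | Sum.inl fin => fin
  | Sum.inr (fin, cur, _, rest) => (fin ++ [cur]) ++ rest.map (fun _ => ([] : List Int))

theorem pvChunks_nil (ds : List Int) :
    pvChunks [] ds = ds.map (fun _ => ([] : List Int)) := by
  induction ds with
  | nil => rfl
  | cons d ds ih => simp [pvChunks, ih]

theorem pvFoldB_inl (yl : List Int) (fin : List (List Int)) :
    yl.foldl pvStepB (Sum.inl fin) = Sum.inl fin := by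
  induction yl with
  | nil => rfl
  | cons x ys ih => simpa [pvStepB] using ih

-- B's loop invariant: from a continue state, the finished result is the chunk normal form
theorem pvFoldB (yl : List Int) :
    ∀ (fin : List (List Int)) (cur : List Int) (hl : Int) (rest : List Int),
      0 ≤ hl → (∀ d ∈ rest, 0 < d) →
      pvFinal (yl.foldl pvStepB (Sum.inr (fin, cur, hl, rest)))
        = (fin ++ [cur ++ yl.take hl.toNat]) ++ pvChunks (yl.drop hl.toNat) rest := by
  induction yl with
  | nil =>
    intro fin cur hl rest _ _
    simp [pvFinal, pvChunks_nil]
  | cons x ys ih =>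
    intro fin cur hl rest hnn hrest
    by_cases h0 : hl = 0
    · subst h0
      match rest with
      | [] =>
        have hstep : pvStepB (Sum.inr (fin, cur, 0, ([] : List Int))) x
            = Sum.inl (fin ++ [cur]) := by simp [pvStepB, pvWhileB]
        rw [List.foldl_cons, hstep, pvFoldB_inl]
        simp [pvFinal, pvChunks]
      | d :: rest' =>
        have hd : 0 < d := hrest d (by simp)
        have hstep : pvStepB (Sum.inr (fin, cur, 0, d :: rest')) x
            = Sum.inr (fin ++ [cur], [x], d * 24 - 1, rest') := by
          have : (d * 24 == 0) = false := by simp; omega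
          simp [pvStepB, pvWhileB, this]
        rw [List.foldl_cons, hstep,
          ih (fin ++ [cur]) [x] (d * 24 - 1) rest' (by omega)
            (fun e he => hrest e (by simp [he]))]
        have htn : (d * 24).toNat = (d * 24 - 1).toNat + 1 := by omega
        simp only [pvChunks]
        rw [htn]
        simp
    · have hstep : pvStepB (Sum.inr (fin, cur, hl, rest)) x
          = Sum.inr (fin, cur ++ [x], hl - 1, rest) := by
        have : (hl == 0) = false := by simp [h0]
        simp [pvStepB, pvWhileB, this]
      rw [List.foldl_cons, hstep,
        ih fin (cur ++ [x]) (hl - 1) rest (by omega) hrest]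
      have htn : hl.toNat = (hl - 1).toNat + 1 := by omega
      rw [htn]
      simp

-- the (start, stop) hour pairs A's running accumulator walks through, starting at s
def pvScanA (ds : List Int) (s : Int) : List (Int × Int) :=
  match ds with
  | [] => []
  | d :: ds' => (s * 24, (s + d) * 24) :: pvScanA ds' (s + d)

-- A's foldl produces exactly the slices of its scanned pair list
theorem pvFoldA (yl : List Int) (ds : List Int) :
    ∀ (acc : List (List Int)) (s : Int),
    (ds.foldl
      (fun (st : List (List Int) × Int) month =>
        (st.1 ++ [PySem.List.slice yl (some (st.2 * 24)) (some ((st.2 + month) * 24))],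
         st.2 + month))
      (acc, s)).1
    = acc ++ (pvScanA ds s).map
        (fun p => PySem.List.slice yl (some p.1) (some p.2)) := by
  induction ds with
  | nil => intro acc s; simp [pvScanA]
  | cons d ds ih => intro acc s; simp [pvScanA, List.foldl, ih]

-- A's slices are the chunk normal form of the suffix starting at hour s*24
theorem pvScanA_chunks (yl : List Int) (ds : List Int) :
    ∀ (s : Int), 0 ≤ s → (∀ d ∈ ds, 0 ≤ d) →
    (pvScanA ds s).map (fun p => PySem.List.slice yl (some p.1) (some p.2))
      = pvChunks (yl.drop (s * 24).toNat) ds := by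
  induction ds with
  | nil => intro s _ _; rfl
  | cons d ds ih =>
    intro s hs hds
    have hd : 0 ≤ d := hds d (by simp)
    have h1 : PySem.List.slice yl (some (s * 24)) (some ((s + d) * 24))
        = (yl.drop (s * 24).toNat).take (((s + d) * 24).toNat - (s * 24).toNat) :=
      PySem.List.slice_toNat yl (by positivity) (by positivity)
    have h2 : ((s + d) * 24).toNat - (s * 24).toNat = (d * 24).toNat := by
      have : (s + d) * 24 = s * 24 + d * 24 := by ring
      omega
    have h3 : (yl.drop (s * 24).toNat).drop (d * 24).toNat
        = yl.drop (((s + d) * 24).toNat) := by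
      rw [List.drop_drop]
      congr 1
      have : (s + d) * 24 = s * 24 + d * 24 := by ring
      omega
    simp only [pvScanA, List.map_cons, pvChunks, h1, h2, h3,
      ih (s + d) (by omega) (fun e he => hds e (by simp [he]))]

-- ===== VERDICT (by name: the statement is the Claim_ definition above) =====
theorem make_monthly_list_spec : Claim_equal_make_monthly_list := by
  intro yl _
  unfold Spec_make_monthly_list make_monthly_list make_monthly_list_alt
  have hA := pvFoldA yl [31, 28, 31, 30, 31, 30, 31, 31, 30, 31, 30, 31] [] 0
  have hAC := pvScanA_chunks yl [31, 28, 31, 30, 31, 30, 31, 31, 30, 31, 30, 31] 0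
    (le_refl 0) (by decide)
  have hB := pvFoldB yl [] [] ((31 : Int) * 24) [28, 31, 30, 31, 30, 31, 31, 30, 31, 30, 31]
    (by norm_num) (by decide)
  simp only [List.getD, List.drop] at *
  rw [hA, hAC]
  show pvChunks (yl.drop ((0 : Int) * 24).toNat) _
      = pvFinal (yl.foldl pvStepB (Sum.inr ([], [], (31 : Int) * 24, _)))
  rw [hB]
  simp [pvChunks]
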